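-- pv_equiv track=rewrite | github.com/sujan0991/Protein_Classification | plots/Performance_plot.py | get_cigar
-- ===== SOURCE A (Python) =====
-- import itertools
--
-- def get_cigar(seq_a, seq_b, aln):
--     cigar = ""
--     for index in range(len(aln)):
--         a = seq_a[index:index + 1]
--         b = seq_b[index:index + 1]
--         q = aln[index:index + 1]
--         if a == "-":
--             cigar += "D"
--             continue
--         if b == "-":
--             cigar += "I"
--             continue
--         if q == ".":
--             cigar += "M"
--         if q == ":":
--             cigar += "P"
--     return "".join([str(len(list(group))) + l for l, group in itertools.groupby(cigar)])
-- ===== SOURCE B (Python) =====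
-- def get_cigar(seq_a, seq_b, aln):
--     parts = []
--     cur = None
--     cnt = 0
--     for i in range(len(aln)):
--         if i < len(seq_a) and seq_a[i] == "-":
--             op = "D"
--         elif i < len(seq_b) and seq_b[i] == "-":
--             op = "I"
--         elif aln[i] == ".":
--             op = "M"
--         elif aln[i] == ":":
--             op = "P"
--         else:
--             continue
--         if op == cur:
--             cnt += 1
--         else:
--             if cur is not None:
--                 parts.append(str(cnt) + cur)
--             cur, cnt = op, 1
--     if cur is not None:
--         parts.append(str(cnt) + cur)
--     return "".join(parts)
-- ===== Notes on version B (the rewrite author's own statement) =====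
-- stated objective: alternative
-- what changed: A builds an intermediate op-character string and then re-scans it with itertools.groupby (materialising each group with len(list(group))) to produce the run-length CIGAR; B drops both the intermediate string and groupby, maintaining the current run's op and count in one pass over the alignment and emitting each '<count><op>' piece as the run closes.
import Mathlib
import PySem

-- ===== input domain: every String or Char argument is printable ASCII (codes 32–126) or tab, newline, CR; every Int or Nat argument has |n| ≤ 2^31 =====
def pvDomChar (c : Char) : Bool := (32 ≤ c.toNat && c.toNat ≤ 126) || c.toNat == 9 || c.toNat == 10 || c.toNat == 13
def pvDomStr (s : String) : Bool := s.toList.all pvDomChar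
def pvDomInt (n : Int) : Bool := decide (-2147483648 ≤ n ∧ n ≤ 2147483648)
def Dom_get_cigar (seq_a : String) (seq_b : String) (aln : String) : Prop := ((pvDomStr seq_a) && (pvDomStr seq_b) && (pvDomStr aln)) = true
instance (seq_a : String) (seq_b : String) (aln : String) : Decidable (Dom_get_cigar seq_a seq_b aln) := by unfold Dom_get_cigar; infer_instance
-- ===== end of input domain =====

-- B replaces A's build-a-char-string-then-groupby pipeline by a single pass that maintains the
-- current run (op, count) directly and emits each "<count><op>" piece when the run ends
-- (objective: alternative decomposition; same return value).

-- ===== PORT A =====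
-- itertools.groupby over a string, each group paired with its length (A only uses len(list(group)))
def pyGroupbyRLE : List Char → List (Char × Nat)
  | [] => []
  | c :: rest =>
    (c, (rest.takeWhile (· == c)).length + 1) :: pyGroupbyRLE (rest.dropWhile (· == c))
  termination_by l => l.length
  decreasing_by
    have := List.length_dropWhile_le (· == c) rest
    simp; omega

def get_cigar (seq_a : String) (seq_b : String) (aln : String) : String :=
  let cigar : List Char :=
    (PySem.List.pyRange 0 (PySem.Str.len aln) 1).foldl (fun cigar index =>
      let a := PySem.List.slice seq_a.toList (some index) (some (index + 1))
      let b := PySem.List.slice seq_b.toList (some index) (some (index + 1))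
      let q := PySem.List.slice aln.toList (some index) (some (index + 1))
      if a = ['-'] then cigar ++ ['D']
      else if b = ['-'] then cigar ++ ['I']
      else
        let cigar := if q = ['.'] then cigar ++ ['M'] else cigar
        if q = [':'] then cigar ++ ['P'] else cigar) []
  String.ofList (PySem.Chars.join []
    ((pyGroupbyRLE cigar).map (fun p => PySem.Int.toChars (p.2 : Int) ++ [p.1])))

-- ===== PORT B =====
def get_cigar_alt (seq_a : String) (seq_b : String) (aln : String) : String :=
  let la := seq_a.toList
  let lb := seq_b.toList
  let ln := aln.toList
  let st :=
    (PySem.List.pyRange 0 (PySem.Str.len aln) 1).foldl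
      (fun (st : List (List Char) × Option Char × Int) i =>
        let op? : Option Char :=
          if i < (la.length : Int) ∧ PySem.List.pyGetD la i ' ' = '-' then some 'D'
          else if i < (lb.length : Int) ∧ PySem.List.pyGetD lb i ' ' = '-' then some 'I'
          else if PySem.List.pyGetD ln i ' ' = '.' then some 'M'
          else if PySem.List.pyGetD ln i ' ' = ':' then some 'P'
          else none
        match op? with
        | none => st                                     -- unclassified position: continue
        | some op =>
          if some op = st.2.1 then (st.1, st.2.1, st.2.2 + 1)
          else ((match st.2.1 with
                 | some c => st.1 ++ [PySem.Int.toChars st.2.2 ++ [c]]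
                 | none => st.1), some op, 1))
      ([], none, 0)
  let parts : List (List Char) :=
    match st.2.1 with
    | some c => st.1 ++ [PySem.Int.toChars st.2.2 ++ [c]]
    | none => st.1
  String.ofList (PySem.Chars.join [] parts)

-- ===== PRECONDITION & SPEC =====
def Spec_get_cigar (seq_a : String) (seq_b : String) (aln : String) (out : String) : Prop := out = get_cigar_alt seq_a seq_b aln
instance (seq_a : String) (seq_b : String) (aln : String) (out : String) : Decidable (Spec_get_cigar seq_a seq_b aln out) := by unfold Spec_get_cigar; infer_instance

-- ===== CLAIM (what is proved, stated in full; the proofs are below) =====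
def Claim_equal_get_cigar : Prop := ∀ (seq_a : String) (seq_b : String) (aln : String), Dom_get_cigar seq_a seq_b aln → Spec_get_cigar seq_a seq_b aln (get_cigar seq_a seq_b aln)

-- ===== LEMMAS AND PROOFS =====

-- the op char both programs classify position i with (none = no char emitted)
def pvOpAt (la lb ln : List Char) (i : Int) : Option Char :=
  if i < (la.length : Int) ∧ PySem.List.pyGetD la i ' ' = '-' then some 'D'
  else if i < (lb.length : Int) ∧ PySem.List.pyGetD lb i ' ' = '-' then some 'I'
  else if PySem.List.pyGetD ln i ' ' = '.' then some 'M'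
  else if PySem.List.pyGetD ln i ' ' = ':' then some 'P'
  else none

def pvFmt (c : Char) (n : Int) : List Char := PySem.Int.toChars n ++ [c]

-- B's run-state transition on one classified char
def pvStep (st : List (List Char) × Option Char × Int) (op : Char) :
    List (List Char) × Option Char × Int :=
  if some op = st.2.1 then (st.1, st.2.1, st.2.2 + 1)
  else ((match st.2.1 with
         | some c => st.1 ++ [pvFmt c st.2.2]
         | none => st.1), some op, 1)

def pvFlush (st : List (List Char) × Option Char × Int) : List (List Char) :=
  match st.2.1 with
  | some c => st.1 ++ [pvFmt c st.2.2]
  | none => st.1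

-- run-length string of cs continuing an open run
def pvRleStr : Option (Char × Int) → List Char → List Char
  | none, [] => []
  | some (c, n), [] => pvFmt c n
  | none, x :: xs => pvRleStr (some (x, 1)) xs
  | some (c, n), x :: xs =>
    if x == c then pvRleStr (some (c, n + 1)) xs
    else pvFmt c n ++ pvRleStr (some (x, 1)) xs

theorem pv_join_nil (parts : List (List Char)) : PySem.Chars.join [] parts = parts.flatten := by
  simp [PySem.Chars.join, List.intercalate]
  induction parts with
  | nil => rfl
  | cons p ps ih => cases ps <;> simp_all [List.intersperse]

theorem pv_take_one_drop (l : List Char) (k : Nat) (h : k < l.length) :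
    (l.drop k).take 1 = [l[k]] := by
  rw [List.drop_eq_getElem_cons h]; rfl

-- a one-element slice s[i:i+1] equals [c] iff the index is in range and hits c
theorem pv_slice_eq_single (l : List Char) (i : Int) (h0 : 0 ≤ i) (c : Char) :
    PySem.List.slice l (some i) (some (i + 1)) = [c] ↔
      (i < (l.length : Int) ∧ PySem.List.pyGetD l i ' ' = c) := by
  rw [PySem.List.slice_toNat (xs := l) (a := i) (b := i + 1) h0 (by omega)]
  have htn : (i + 1).toNat - i.toNat = 1 := by omega
  rw [htn]
  by_cases hlt : i < (l.length : Int)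
  · have hk : i.toNat < l.length := by omega
    rw [pv_take_one_drop l i.toNat hk, PySem.List.pyGetD_eq_getElem l ' ' h0 hlt]
    simp [hlt]
  · have hk : l.length ≤ i.toNat := by omega
    rw [List.drop_eq_nil_of_le hk]
    simp [hlt]

-- per loop index, A's step appends exactly the classified char
theorem pv_stepA_eq (la lb ln : List Char) (i : Int) (h0 : 0 ≤ i) (hlt : i < (ln.length : Int))
    (cigar : List Char) :
    (let a := PySem.List.slice la (some i) (some (i + 1))
     let b := PySem.List.slice lb (some i) (some (i + 1))
     let q := PySem.List.slice ln (some i) (some (i + 1))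
     if a = ['-'] then cigar ++ ['D']
     else if b = ['-'] then cigar ++ ['I']
     else
       let cigar := if q = ['.'] then cigar ++ ['M'] else cigar
       if q = [':'] then cigar ++ ['P'] else cigar)
      = cigar ++ (pvOpAt la lb ln i).toList := by
  have hq : ∀ c : Char, (PySem.List.slice ln (some i) (some (i+1)) = [c]) ↔ (PySem.List.pyGetD ln i ' ' = c) := by
    intro c
    rw [pv_slice_eq_single ln i h0 c]
    simp [hlt]
  simp only [pvOpAt, pv_slice_eq_single la i h0 '-', pv_slice_eq_single lb i h0 '-', hq]
  split_ifs with h1 h2 h3 h4 <;> simp_all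

-- skipping `none`s: the loop over positions is the run-length loop over the classified chars
theorem pv_foldl_optStep {σ : Type} (g : σ → Char → σ) (f : Int → Option Char)
    (l : List Int) (st : σ) :
    l.foldl (fun st i => match f i with | none => st | some c => g st c) st
      = (l.flatMap (fun i => (f i).toList)).foldl g st := by
  induction l generalizing st with
  | nil => rfl
  | cons i t ih => cases h : f i <;> simp [h, ih]

-- invariant of B's loop: flushed output = emitted parts plus the open run's rle string
theorem pv_flatten_flush (cs : List Char) (parts : List (List Char)) (cur : Option Char) (cnt : Int) :
    (pvFlush (cs.foldl pvStep (parts, cur, cnt))).flatten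
      = parts.flatten ++ pvRleStr (cur.map (fun c => (c, cnt))) cs := by
  induction cs generalizing parts cur cnt with
  | nil => cases cur <;> simp [pvFlush, pvRleStr]
  | cons x xs ih =>
    cases cur with
    | none => simp [pvStep, pvRleStr, ih]
    | some c =>
      by_cases hx : x = c
      · subst hx
        simp [pvStep, pvRleStr, ih]
      · have hne : ¬ (some x = some c) := by simp [hx]
        simp [pvStep, pvRleStr, hx, hne, ih]

-- an open run absorbs the leading equal chars, then continues closed
theorem pv_rleStr_run (cs : List Char) (c : Char) (m : Int) :
    pvRleStr (some (c, m)) cs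
      = pvFmt c (m + ((cs.takeWhile (· == c)).length : Int))
        ++ pvRleStr none (cs.dropWhile (· == c)) := by
  induction cs generalizing m with
  | nil => simp [pvRleStr]
  | cons x xs ih =>
    by_cases hx : x = c
    · subst hx
      simp only [pvRleStr, List.takeWhile, List.dropWhile, beq_self_eq_true, if_true]
      rw [ih]
      have h1 : m + 1 + ((xs.takeWhile (· == x)).length : Int)
          = m + (((xs.takeWhile (· == x)).length + 1 : Nat) : Int) := by push_cast; ring
      simp [h1]
    · have hbe : (x == c) = false := by simp [hx]
      simp [pvRleStr, List.takeWhile, List.dropWhile, hbe]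

-- the run-length loop computes exactly A's groupby encoding
theorem pv_rleStr_groupby (cs : List Char) :
    pvRleStr none cs
      = ((pyGroupbyRLE cs).map (fun p => PySem.Int.toChars (p.2 : Int) ++ [p.1])).flatten := by
  generalize hn : cs.length = n
  induction n using Nat.strong_induction_on generalizing cs with
  | _ n ih =>
    cases cs with
    | nil => simp [pvRleStr, pyGroupbyRLE]
    | cons c rest =>
      rw [pvRleStr, pv_rleStr_run, pyGroupbyRLE]
      have hlen : (rest.dropWhile (· == c)).length < n := by
        have := List.length_dropWhile_le (· == c) rest
        simp at hn; omega
      rw [ih _ hlen _ rfl]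
      have h1 : (1 : Int) + ((rest.takeWhile (· == c)).length : Int)
          = (((rest.takeWhile (· == c)).length + 1 : Nat) : Int) := by push_cast; ring
      simp [pvFmt, h1]

theorem pv_main_eq (seq_a seq_b aln : String) :
    get_cigar seq_a seq_b aln = get_cigar_alt seq_a seq_b aln := by
  show String.ofList (PySem.Chars.join []
      ((pyGroupbyRLE ((PySem.List.pyRange 0 (PySem.Str.len aln) 1).foldl (fun cigar index =>
        let a := PySem.List.slice seq_a.toList (some index) (some (index + 1))
        let b := PySem.List.slice seq_b.toList (some index) (some (index + 1))
        let q := PySem.List.slice aln.toList (some index) (some (index + 1))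
        if a = ['-'] then cigar ++ ['D']
        else if b = ['-'] then cigar ++ ['I']
        else
          let cigar := if q = ['.'] then cigar ++ ['M'] else cigar
          if q = [':'] then cigar ++ ['P'] else cigar) [])).map
        (fun p => PySem.Int.toChars (p.2 : Int) ++ [p.1])))
    = String.ofList (PySem.Chars.join [] (pvFlush
        ((PySem.List.pyRange 0 (PySem.Str.len aln) 1).foldl
          (fun st i => match pvOpAt seq_a.toList seq_b.toList aln.toList i with
            | none => st
            | some op => pvStep st op) ([], none, 0))))
  have hmem : ∀ i ∈ PySem.List.pyRange 0 (PySem.Str.len aln) 1, 0 ≤ i ∧ i < (aln.toList.length : Int) := by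
    intro i hi
    have : PySem.Str.len aln = (aln.toList.length : Int) := by simp
    rw [this] at hi
    exact PySem.List.mem_pyRange_one.mp hi
  rw [PySem.List.foldl_congr_mem' _ _
        (fun acc i => acc ++ (pvOpAt seq_a.toList seq_b.toList aln.toList i).toList) []
        (fun i hi acc => pv_stepA_eq seq_a.toList seq_b.toList aln.toList i (hmem i hi).1 (hmem i hi).2 acc),
      PySem.List.foldl_append_eq_flatMap,
      pv_foldl_optStep pvStep (pvOpAt seq_a.toList seq_b.toList aln.toList),
      pv_join_nil, pv_join_nil]
  rw [show (pvFlush ((((PySem.List.pyRange 0 (PySem.Str.len aln) 1).flatMap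
        (fun i => (pvOpAt seq_a.toList seq_b.toList aln.toList i).toList))).foldl pvStep ([], none, 0))).flatten
      = pvRleStr none ((PySem.List.pyRange 0 (PySem.Str.len aln) 1).flatMap
        (fun i => (pvOpAt seq_a.toList seq_b.toList aln.toList i).toList)) from by
    rw [pv_flatten_flush _ [] none 0]; rfl]
  rw [pv_rleStr_groupby]
  simp

-- ===== VERDICT (by name: the statement is the Claim_ definition above) =====
theorem get_cigar_spec : Claim_equal_get_cigar := by
  intro seq_a seq_b aln _dom
  unfold Spec_get_cigar
  exact pv_main_eq seq_a seq_b aln
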